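-- pv_equiv track=rewrite | github.com/awesomo913/card-collection-anime | backend/providers/catalog.py | _pick_yugioh_printing
-- ===== SOURCE A (Python) =====
-- from typing import Dict, List, Optional, Tuple
--
-- def _pick_yugioh_printing(sets: List[Dict], target_tokens: List[str]) -> Optional[Dict]:
--     """Pick the printing whose set_name shares the most tokens with the URL slug."""
--     if not sets:
--         return None
--     if not target_tokens:
--         return sets[0]
--     target = set(t.lower() for t in target_tokens)
--     scored = []
--     for entry in sets:
--         name = (entry.get("set_name") or "").lower().replace("-", " ")
--         overlap = len(target & set(name.split()))
--         scored.append((overlap, entry))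
--     scored.sort(key=lambda pair: -pair[0])
--     # Only prefer the matched printing when there's actual overlap.
--     return scored[0][1] if scored[0][0] > 0 else sets[0]
-- ===== SOURCE B (Python) =====
-- from typing import Dict, List, Optional
--
-- def _pick_yugioh_printing(sets: List[Dict], target_tokens: List[str]) -> Optional[Dict]:
--     """Pick the printing whose set_name shares the most tokens with the URL slug."""
--     if not sets:
--         return None
--     if not target_tokens:
--         return sets[0]
--     target = {t.lower() for t in target_tokens}
--     best_entry, best_overlap = sets[0], 0
--     for entry in sets:
--         name = (entry.get("set_name") or "").lower().replace("-", " ")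
--         overlap = len(target & set(name.split()))
--         if overlap > best_overlap:
--             best_entry, best_overlap = entry, overlap
--     return best_entry if best_overlap > 0 else sets[0]
-- ===== Notes on version B (the rewrite author's own statement) =====
-- stated objective: simpler
-- what changed: Replaced building a scored list, sorting it by negated overlap and taking its head with a single argmax pass that keeps the best entry and overlap, updating only on strictly greater overlap so the first maximum wins like the stable sort.
import Mathlib
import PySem

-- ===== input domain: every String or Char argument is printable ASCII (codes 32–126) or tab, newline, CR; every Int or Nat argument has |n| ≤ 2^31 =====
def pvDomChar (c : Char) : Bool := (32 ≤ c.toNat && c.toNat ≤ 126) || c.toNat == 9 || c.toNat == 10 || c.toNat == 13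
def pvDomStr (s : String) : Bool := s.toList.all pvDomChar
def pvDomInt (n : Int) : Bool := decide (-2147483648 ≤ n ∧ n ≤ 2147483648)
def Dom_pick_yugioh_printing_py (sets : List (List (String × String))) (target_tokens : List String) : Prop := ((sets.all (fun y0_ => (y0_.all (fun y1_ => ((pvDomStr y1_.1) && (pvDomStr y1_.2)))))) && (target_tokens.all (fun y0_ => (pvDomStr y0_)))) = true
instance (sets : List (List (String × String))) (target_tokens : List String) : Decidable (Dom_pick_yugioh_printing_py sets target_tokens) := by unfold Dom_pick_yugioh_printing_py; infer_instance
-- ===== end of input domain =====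

-- B replaces A's score-sort-take-head by a single first-wins argmax scan (objective: simpler).

-- ===== PORT A =====
-- overlap score of one entry against the lowercased target set (shared scoring step of both Pythons)
def pvOverlap (target : PySem.Set String) (entry : List (String × String)) : Int :=
  let name := PySem.Str.replace (PySem.Str.lower (((PySem.Dict.mk entry).get? "set_name").getD "")) "-" " "
  (PySem.Set.len (PySem.Set.inter target (PySem.Set.ofList (PySem.Str.split₀ name))) : Int)

def pick_yugioh_printing_py (sets : List (List (String × String))) (target_tokens : List String) : Option (List (String × String)) :=
  if sets = [] then none
  else if target_tokens = [] then PySem.List.pyGet? sets 0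
  else
    let target := PySem.Set.ofList (target_tokens.map PySem.Str.lower)
    let scored := sets.foldl (fun acc entry => acc ++ [(pvOverlap target entry, entry)]) []
    let scored := PySem.List.sorted scored (fun pair => -pair.1) false
    match scored with
    | [] => none  -- unreachable: scored has one pair per element of the nonempty sets
    | (o, e) :: _ => if o > 0 then some e else PySem.List.pyGet? sets 0

-- ===== PORT B =====
def pick_yugioh_printing_py_alt (sets : List (List (String × String))) (target_tokens : List String) : Option (List (String × String)) :=
  match sets with
  | [] => none
  | first :: _ =>
    if target_tokens = [] then some first
    else
      let target := PySem.Set.ofList (target_tokens.map PySem.Str.lower)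
      let best := sets.foldl
        (fun best entry =>
          if pvOverlap target entry > best.2 then (entry, pvOverlap target entry) else best)
        (first, (0 : Int))
      if best.2 > 0 then some best.1 else some first

-- ===== PRECONDITION & SPEC =====
def Spec_pick_yugioh_printing_py (sets : List (List (String × String))) (target_tokens : List String) (out : Option (List (String × String))) : Prop := out = pick_yugioh_printing_py_alt sets target_tokens
instance (sets : List (List (String × String))) (target_tokens : List String) (out : Option (List (String × String))) : Decidable (Spec_pick_yugioh_printing_py sets target_tokens out) := by unfold Spec_pick_yugioh_printing_py; infer_instance

-- ===== CLAIM (what is proved, stated in full; the proofs are below) =====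
def Claim_equal_pick_yugioh_printing_py : Prop := ∀ (sets : List (List (String × String))) (target_tokens : List String), Dom_pick_yugioh_printing_py sets target_tokens → Spec_pick_yugioh_printing_py sets target_tokens (pick_yugioh_printing_py sets target_tokens)

-- ===== LEMMAS AND PROOFS =====

theorem insertBy_cons_head {α : Type} (key : α → Int) (x h : α) (t : List α) :
    ∃ t', PySem.List.insertBy (fun a b => decide (key a < key b)) x (h :: t)
          = (if key x < key h then x else h) :: t' := by
  simp only [PySem.List.insertBy]
  by_cases hc : key x < key h
  · exact ⟨h :: t, by simp [hc]⟩
  · exact ⟨PySem.List.insertBy (fun a b => decide (key a < key b)) x t, by simp [hc]⟩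

-- head of the insertion-sort fold = first-strict-min scan over the processed elements
theorem head_foldl_insertBy {α : Type} (key : α → Int) (bf : α → α → Bool)
    (hbf : bf = fun a b => decide (key a < key b)) (l : List α) (h : α) (t : List α) :
    ∃ t', l.foldl (fun acc x => PySem.List.insertBy bf x acc) (h :: t)
          = (l.foldl (fun m x => if key x < key m then x else m) h) :: t' := by
  subst hbf
  induction l generalizing h t with
  | nil => exact ⟨t, rfl⟩
  | cons x l ih =>
    simp only [List.foldl_cons]
    obtain ⟨t', ht'⟩ := insertBy_cons_head key x h t
    rw [ht']
    exact ih _ t'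

-- the pair-valued min scan of A is B's (entry, overlap) argmax scan, swapped
theorem scan_bridge (target : PySem.Set String) (rest : List (List (String × String)))
    (e : List (String × String)) (o : Int) (ho : o = pvOverlap target e) :
    (rest.map (fun entry => (pvOverlap target entry, entry))).foldl
        (fun m x => if (fun pair : Int × List (String × String) => -pair.1) x < (fun pair => -pair.1) m then x else m)
        (pvOverlap target e, e)
      = Prod.swap (rest.foldl
        (fun best entry =>
          if pvOverlap target entry > best.2 then (entry, pvOverlap target entry) else best) (e, o)) := by
  induction rest generalizing e o with
  | nil => simp [Prod.swap, ho]
  | cons x rest ih =>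
    simp only [List.map_cons, List.foldl_cons]
    by_cases hc : pvOverlap target e < pvOverlap target x
    · have h1 : -(pvOverlap target x) < -(pvOverlap target e) := by omega
      have h2 : pvOverlap target x > o := by omega
      simp only [h1, h2, gt_iff_lt, if_pos]
      exact ih x _ rfl
    · have h1 : ¬ (-(pvOverlap target x) < -(pvOverlap target e)) := by omega
      have h2 : ¬ (o < pvOverlap target x) := by omega
      simp only [if_neg h1, gt_iff_lt, if_neg h2]
      exact ih e o ho

theorem overlap_nonneg (target : PySem.Set String) (e : List (String × String)) :
    0 ≤ pvOverlap target e := by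
  simp only [pvOverlap]
  exact Int.natCast_nonneg _

-- ===== VERDICT (by name: the statement is the Claim_ definition above) =====
theorem pick_yugioh_printing_py_spec : Claim_equal_pick_yugioh_printing_py := by
  intro sets target_tokens _
  unfold Spec_pick_yugioh_printing_py pick_yugioh_printing_py pick_yugioh_printing_py_alt
  cases sets with
  | nil => simp
  | cons first rest =>
    simp only [reduceCtorEq, if_false]
    by_cases htt : target_tokens = []
    · simp [htt, PySem.List.pyGet?, PySem.List.pyIdx?]
    · rw [if_neg htt, if_neg htt]
      set target := PySem.Set.ofList (target_tokens.map PySem.Str.lower) with htgt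
      -- A's scored list is a map; its sort is the insertBy fold
      rw [PySem.List.foldl_append_singleton_eq_map]
      rw [PySem.List.sorted_eq_foldl_insertBy]
      simp only [List.map_cons, List.foldl_cons, List.nil_append, PySem.List.insertBy]
      obtain ⟨t', ht'⟩ := head_foldl_insertBy (fun pair : Int × List (String × String) => -pair.1) _ rfl
        (rest.map (fun entry => (pvOverlap target entry, entry))) (pvOverlap target first, first) []
      rw [ht', scan_bridge target rest first (pvOverlap target first) rfl]
      -- B's first step lands in the state (first, pvOverlap target first)
      rw [show ((if pvOverlap target first > ((first, (0:Int)) : List (String × String) × Int).2 then (first, pvOverlap target first) else (first, (0:Int)))) = (first, pvOverlap target first) from by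
        by_cases h0 : pvOverlap target first > 0
        · simp [h0]
        · have : pvOverlap target first = 0 :=
            le_antisymm (by omega) (overlap_nonneg target first)
          simp [this]]
      rcases hb : rest.foldl
          (fun best entry =>
            if pvOverlap target entry > best.2 then (entry, pvOverlap target entry) else best)
          (first, pvOverlap target first) with ⟨be, bo⟩
      simp [Prod.swap, PySem.List.pyGet?, PySem.List.pyIdx?]
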